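-- pv_equiv track=rewrite | github.com/jairsan/Segmentation-Free_Streaming_Machine_Translation | experiments/iwslt22_deen/models/Transformer_BIG_ds/document-mt/convert_doc_format_to_sentences_history_length_limited_V2.py | filter_length
-- ===== SOURCE A (Python) =====
-- def compute_length_buffer(buf):
--     length=0
--     for s in buf:
--         length+= len(s.split(" "))
--     return length
--
-- def filter_length(s_buf,t_buf, length_limit_src, length_limit_tgt):
--     while compute_length_buffer(s_buf) > length_limit_src or compute_length_buffer(t_buf) > length_limit_tgt:
--         if len(s_buf) > 1:
--             s_buf.pop(0)
--             t_buf.pop(0)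
--         else:
--             break
--
--     return s_buf, t_buf
-- ===== SOURCE B (Python) =====
-- def filter_length(s_buf, t_buf, length_limit_src, length_limit_tgt):
--     # Precompute per-sentence word counts once, keep running totals and
--     # advance a single front pointer; then drop the prefix in one go.
--     # Like the original, this mutates s_buf/t_buf in place and returns them.
--     src_counts = [len(s.split(" ")) for s in s_buf]
--     tgt_counts = [len(t.split(" ")) for t in t_buf]
--     src_total = sum(src_counts)
--     tgt_total = sum(tgt_counts)
--     n = len(s_buf)
--     k = 0
--     while (src_total > length_limit_src or tgt_total > length_limit_tgt) and n - k > 1: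
--         src_total -= src_counts[k]
--         tgt_total -= tgt_counts[k]
--         k += 1
--     del s_buf[:k]
--     del t_buf[:k]
--     return s_buf, t_buf
-- ===== Notes on version B (the rewrite author's own statement) =====
-- stated objective: faster
-- what changed: A re-scans both whole buffers to recount words on every single pop; B computes per-sentence word counts once, keeps running totals and advances one front pointer, then drops the whole prefix at once.
import Mathlib
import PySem

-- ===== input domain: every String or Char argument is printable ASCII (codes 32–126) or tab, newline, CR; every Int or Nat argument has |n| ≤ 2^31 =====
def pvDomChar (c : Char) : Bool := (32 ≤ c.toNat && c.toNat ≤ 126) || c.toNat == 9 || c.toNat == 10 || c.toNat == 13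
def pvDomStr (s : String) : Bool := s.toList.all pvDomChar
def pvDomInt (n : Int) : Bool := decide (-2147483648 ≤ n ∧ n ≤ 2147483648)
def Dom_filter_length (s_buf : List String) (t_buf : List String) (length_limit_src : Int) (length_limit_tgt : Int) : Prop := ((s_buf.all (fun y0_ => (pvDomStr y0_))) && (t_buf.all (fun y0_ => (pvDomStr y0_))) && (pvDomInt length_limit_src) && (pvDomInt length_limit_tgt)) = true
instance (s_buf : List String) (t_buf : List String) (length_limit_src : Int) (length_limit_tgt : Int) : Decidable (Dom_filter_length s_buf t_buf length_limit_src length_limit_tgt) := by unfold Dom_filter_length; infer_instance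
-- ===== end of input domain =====

-- B replaces A's re-scan of both whole buffers on every pop (O(n^2)) by precomputed
-- per-sentence word counts with running totals and one advancing front pointer (O(n)).
-- Both Pythons mutate s_buf/t_buf in place the same way; the theorems are about the return value.

-- ===== PORT A =====
-- len(s.split(" ")) — shared by both ports (the word count of one sentence)
def pvWc (s : String) : Int := (((PySem.Str.split? s " ").getD []).length : Int)

-- compute_length_buffer: running total over the buffer
def pvCLB (buf : List String) : Int := buf.foldl (fun acc s => acc + pvWc s) 0

-- the while loop: recompute both totals, pop the front of both buffers while too long
-- (t_buf.pop(0) on an empty t_buf raises IndexError in Python; that case is outside Pre_)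
def filter_length (s_buf : List String) (t_buf : List String) (length_limit_src : Int) (length_limit_tgt : Int) : List String × List String :=
  if pvCLB s_buf > length_limit_src ∨ pvCLB t_buf > length_limit_tgt then
    if s_buf.length > 1 then
      filter_length s_buf.tail t_buf.tail length_limit_src length_limit_tgt
    else (s_buf, t_buf)
  else (s_buf, t_buf)
termination_by s_buf.length
decreasing_by simp [List.length_tail]; omega

-- ===== PORT B =====
-- Source B's while loop: running totals, subtract the k-th counts and advance k
-- (tgt_counts[k] out of range in Python raises IndexError; that case is outside Pre_, here k stops)
def pvDrop (sc : List Int) (tc : List Int) (S : Int) (T : Int) (length_limit_src : Int) (length_limit_tgt : Int) : Nat :=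
  match sc, tc with
  | a :: a2 :: sc', b :: tc' =>
      if S > length_limit_src ∨ T > length_limit_tgt then
        pvDrop (a2 :: sc') tc' (S - a) (T - b) length_limit_src length_limit_tgt + 1
      else 0
  | _, _ => 0

def filter_length_alt (s_buf : List String) (t_buf : List String) (length_limit_src : Int) (length_limit_tgt : Int) : List String × List String :=
  let sc := s_buf.map pvWc
  let tc := t_buf.map pvWc
  let k := pvDrop sc tc sc.sum tc.sum length_limit_src length_limit_tgt
  (s_buf.drop k, t_buf.drop k)

-- ===== PRECONDITION & SPEC =====
-- Pre_ excludes exactly the inputs on which A raises IndexError: t_buf runs empty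
-- (t_buf.pop(0) on []) while s_buf still has more than one sentence and is still too long.
def Pre_filter_length (s_buf : List String) (t_buf : List String) (length_limit_src : Int) (length_limit_tgt : Int) : Prop :=
  ¬ (t_buf.length + 1 < s_buf.length ∧
     (((s_buf.drop t_buf.length).map pvWc).sum > length_limit_src ∨ (0:Int) > length_limit_tgt))
instance (s_buf : List String) (t_buf : List String) (length_limit_src : Int) (length_limit_tgt : Int) : Decidable (Pre_filter_length s_buf t_buf length_limit_src length_limit_tgt) := by unfold Pre_filter_length; infer_instance

def pvWitness_filter_length : List String × List String × Int × Int := (["a b", "c"], ["x", "y z"], 10, 10)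

def Spec_filter_length (s_buf : List String) (t_buf : List String) (length_limit_src : Int) (length_limit_tgt : Int) (out : List String × List String) : Prop := out = filter_length_alt s_buf t_buf length_limit_src length_limit_tgt
instance (s_buf : List String) (t_buf : List String) (length_limit_src : Int) (length_limit_tgt : Int) (out : List String × List String) : Decidable (Spec_filter_length s_buf t_buf length_limit_src length_limit_tgt out) := by unfold Spec_filter_length; infer_instance

-- ===== CLAIM (what is proved, stated in full; the proofs are below) =====
def Claim_equal_filter_length : Prop := ∀ (s_buf : List String) (t_buf : List String) (length_limit_src : Int) (length_limit_tgt : Int), Dom_filter_length s_buf t_buf length_limit_src length_limit_tgt → Pre_filter_length s_buf t_buf length_limit_src length_limit_tgt → Spec_filter_length s_buf t_buf length_limit_src length_limit_tgt (filter_length s_buf t_buf length_limit_src length_limit_tgt)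

-- ===== LEMMAS AND PROOFS =====

lemma pvCLB_eq_sum (buf : List String) : pvCLB buf = (buf.map pvWc).sum := by
  have h : ∀ (l : List String) (acc : Int),
      l.foldl (fun acc s => acc + pvWc s) acc = acc + (l.map pvWc).sum := by
    intro l
    induction l with
    | nil => intro acc; simp
    | cons a l ih => intro acc; simp [List.foldl, ih]; ring
  simpa [pvCLB] using h buf 0

lemma pvDrop_single (x : Int) (tc : List Int) (S T Ls Lt : Int) :
    pvDrop [x] tc S T Ls Lt = 0 := by
  cases tc <;> rfl

lemma pvDrop_zero (sc tc : List Int) (S T Ls Lt : Int)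
    (h : ¬ (S > Ls ∨ T > Lt)) : pvDrop sc tc S T Ls Lt = 0 := by
  cases sc with
  | nil => rfl
  | cons a sc' =>
    cases sc' with
    | nil => exact pvDrop_single a tc S T Ls Lt
    | cons a2 sc'' =>
      cases tc with
      | nil => rfl
      | cons b tc' => simp [pvDrop, h]

lemma filter_length_main : ∀ (s_buf t_buf : List String) (Ls Lt : Int),
    Pre_filter_length s_buf t_buf Ls Lt →
    filter_length s_buf t_buf Ls Lt =
      (s_buf.drop (pvDrop (s_buf.map pvWc) (t_buf.map pvWc) (s_buf.map pvWc).sum (t_buf.map pvWc).sum Ls Lt),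
       t_buf.drop (pvDrop (s_buf.map pvWc) (t_buf.map pvWc) (s_buf.map pvWc).sum (t_buf.map pvWc).sum Ls Lt)) := by
  intro s_buf
  induction s_buf with
  | nil =>
    intro t_buf Ls Lt _
    rw [filter_length]
    split_ifs with hc hl
    · simp at hl
    · simp [pvDrop]
    · simp [pvDrop]
  | cons a s' ih =>
    intro t_buf Ls Lt hpre
    rw [filter_length]
    by_cases hc : pvCLB (a :: s') > Ls ∨ pvCLB t_buf > Lt
    · by_cases hl : (a :: s').length > 1
      · -- s' ≠ []
        cases s' with
        | nil => simp at hl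
        | cons a2 s'' =>
          cases t_buf with
          | nil =>
            -- Pre_ is violated: A's t_buf.pop(0) raises here
            exfalso
            apply hpre
            constructor
            · simp only [List.length_nil, List.length_cons] at hl ⊢; omega
            · simpa [pvCLB_eq_sum] using hc
          | cons b t' =>
            simp only [if_pos hc, if_pos hl, List.tail_cons]
            have hpre' : Pre_filter_length (a2 :: s'') t' Ls Lt := by
              unfold Pre_filter_length at hpre ⊢
              intro ⟨h1, h2⟩
              exact hpre ⟨by simpa using Nat.add_lt_add_right h1 1, by simpa using h2⟩
            rw [ih t' Ls Lt hpre']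
            have hcond : ((a :: a2 :: s'').map pvWc).sum > Ls ∨ ((b :: t').map pvWc).sum > Lt := by
              simpa [pvCLB_eq_sum] using hc
            have hd : pvDrop ((a :: a2 :: s'').map pvWc) ((b :: t').map pvWc)
                ((a :: a2 :: s'').map pvWc).sum ((b :: t').map pvWc).sum Ls Lt
              = pvDrop ((a2 :: s'').map pvWc) (t'.map pvWc)
                  ((a2 :: s'').map pvWc).sum (t'.map pvWc).sum Ls Lt + 1 := by
              simp only [List.map_cons]
              rw [pvDrop]
              simp only [List.map_cons] at hcond
              rw [if_pos hcond]
              congr 1; simp [List.sum_cons]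
            rw [hd]
            simp [List.drop_succ_cons]
      · -- len(s_buf) ≤ 1, break: no drop
        cases s' with
        | cons _ _ => simp at hl
        | nil =>
          simp only [if_pos hc, if_neg hl]
          rw [List.map_cons, List.map_nil, pvDrop_single]
          simp
    · -- condition false: loop never entered
      simp only [if_neg hc]
      have h0 : pvDrop ((a :: s').map pvWc) (t_buf.map pvWc)
          ((a :: s').map pvWc).sum (t_buf.map pvWc).sum Ls Lt = 0 := by
        apply pvDrop_zero
        simpa [pvCLB_eq_sum] using hc
      rw [h0]; simp

-- ===== VERDICT (by name: the statement is the Claim_ definition above) =====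
theorem filter_length_spec : Claim_equal_filter_length := by
  intro s_buf t_buf Ls Lt _ hpre
  unfold Spec_filter_length filter_length_alt
  simpa using filter_length_main s_buf t_buf Ls Lt hpre
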